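-- pv_equiv track=rewrite | github.com/junes7/python_algorithm | 프로그래머스/1/155652. 둘만의 암호/둘만의 암호.py | solution
-- ===== SOURCE A (Python) =====
-- def solution(s, skip, index):
--     s=list(s)
--     for i in range(len(s)):
--         for j in range(index):
--             if s[i] in skip:
--                 s[i]=chr((ord(s[i])-ord('a')+1)%26+ord('a'))
--             else:
--                 if chr((ord(s[i])-ord('a')+1)%26+ord('a')) in skip:
--                     s[i]=chr((ord(s[i])-ord('a')+2)%26+ord('a'))
--                 else:
--                     s[i]=chr((ord(s[i])-ord('a')+1)%26+ord('a'))
--     r=''.join(s)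
--     return r
-- ===== SOURCE B (Python) =====
-- # Same result as A, but the per-character shift step is iterated with binary lifting on a
-- # 26-entry transition table instead of `index` naive iterations per character.
-- def solution(s, skip, index):
--     def step(c):
--         n1 = chr((ord(c) - ord('a') + 1) % 26 + ord('a'))
--         if (c not in skip) and (n1 in skip):
--             return chr((ord(c) - ord('a') + 2) % 26 + ord('a'))
--         return n1
--
--     if index <= 0:
--         return s
--     base = [ord(step(chr(ord('a') + i))) - ord('a') for i in range(26)]
--     acc = [i for i in range(26)]          # identity permutation table = step^0
--     cur = base                            # step^(2^k) table
--     m = index - 1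
--     while m > 0:
--         if m % 2 == 1:
--             acc = [cur[a] for a in acc]
--         cur = [cur[x] for x in cur]
--         m //= 2
--     return ''.join(chr(ord('a') + acc[ord(step(c)) - ord('a')]) for c in s)
-- ===== Notes on version B (the rewrite author's own statement) =====
-- stated objective: faster
-- what changed: Replaces the per-character inner loop of `index` naive steps by a 26-entry transition table raised to the power index via binary lifting, applied once per character.
import Mathlib
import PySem

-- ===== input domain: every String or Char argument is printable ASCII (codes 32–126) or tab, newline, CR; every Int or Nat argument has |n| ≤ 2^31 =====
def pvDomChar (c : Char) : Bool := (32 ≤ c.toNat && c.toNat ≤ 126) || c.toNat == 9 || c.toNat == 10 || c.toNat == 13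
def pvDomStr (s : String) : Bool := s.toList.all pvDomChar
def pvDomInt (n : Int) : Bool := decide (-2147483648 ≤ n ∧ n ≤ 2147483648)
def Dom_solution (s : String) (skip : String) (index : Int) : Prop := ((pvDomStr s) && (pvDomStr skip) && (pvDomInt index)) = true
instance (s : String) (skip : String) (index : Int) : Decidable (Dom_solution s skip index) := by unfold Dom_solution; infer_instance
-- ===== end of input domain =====

-- B replaces A's per-character inner loop of `index` single shifts by a 26-entry transition
-- table raised to the required power by binary lifting (objective: faster).
-- Conventions shared by both ports: ord('a') = 97, chr/ord are Char.ofNat/Char.toNat (exact on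
-- the chr arguments that occur, which all lie in 97..122); the single-character membership test
-- `c in skip` is PySem.Chars.isIn [c] skip.toList.

-- ===== PORT A =====
-- A's outer loop rewrites only s[i] in iteration i, ported as a map over the characters.
def solution (s : String) (skip : String) (index : Int) : String :=
  String.ofList (s.toList.map (fun c0 =>
    (PySem.List.pyRange 0 index 1).foldl (fun c _j =>
      if PySem.Chars.isIn [c] skip.toList then
        Char.ofNat (PySem.Int.mod ((c.toNat : Int) - 97 + 1) 26 + 97).toNat
      else
        if PySem.Chars.isIn [Char.ofNat (PySem.Int.mod ((c.toNat : Int) - 97 + 1) 26 + 97).toNat] skip.toList then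
          Char.ofNat (PySem.Int.mod ((c.toNat : Int) - 97 + 2) 26 + 97).toNat
        else
          Char.ofNat (PySem.Int.mod ((c.toNat : Int) - 97 + 1) 26 + 97).toNat) c0))

-- ===== PORT B =====
-- Source B's `step`: one shift under the skip rule.
def altStep (skip : List Char) (c : Char) : Char :=
  let n1 := Char.ofNat (PySem.Int.mod ((c.toNat : Int) - 97 + 1) 26 + 97).toNat
  if !PySem.Chars.isIn [c] skip && PySem.Chars.isIn [n1] skip then
    Char.ofNat (PySem.Int.mod ((c.toNat : Int) - 97 + 2) 26 + 97).toNat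
  else n1

-- Source B's `while m > 0` binary-lifting loop; the nonnegative Python int m is carried as a Nat.
def altLoop (cur acc : List Int) (m : Nat) : List Int :=
  if h : m = 0 then acc
  else
    altLoop (cur.map (fun x => PySem.List.pyGetD cur x 0))
      (if m % 2 = 1 then acc.map (fun a => PySem.List.pyGetD cur a 0) else acc)
      (m / 2)
  termination_by m
  decreasing_by exact Nat.div_lt_self (Nat.pos_of_ne_zero h) one_lt_two

def solution_alt (s : String) (skip : String) (index : Int) : String :=
  if index ≤ 0 then s
  else
    let base : List Int := (PySem.List.pyRange 0 26 1).map (fun i =>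
      ((altStep skip.toList (Char.ofNat (97 + i).toNat)).toNat : Int) - 97)
    let acc0 : List Int := (PySem.List.pyRange 0 26 1).map (fun i => i)
    let accF : List Int := altLoop base acc0 (index - 1).toNat
    String.ofList (s.toList.map (fun c =>
      Char.ofNat (97 + PySem.List.pyGetD accF (((altStep skip.toList c).toNat : Int) - 97) 0).toNat))

-- ===== PRECONDITION & SPEC =====
def Spec_solution (s : String) (skip : String) (index : Int) (out : String) : Prop := out = solution_alt s skip index
instance (s : String) (skip : String) (index : Int) (out : String) : Decidable (Spec_solution s skip index out) := by unfold Spec_solution; infer_instance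

-- ===== CLAIM (what is proved, stated in full; the proofs are below) =====
def Claim_equal_solution : Prop := ∀ (s : String) (skip : String) (index : Int), Dom_solution s skip index → Spec_solution s skip index (solution s skip index)

-- ===== LEMMAS AND PROOFS =====

theorem pvToNat_ofNat (n : Nat) (h : n < 55296) : (Char.ofNat n).toNat = n := by
  have hv : n.isValidChar := Or.inl h
  rw [Char.toNat_ofNat, if_pos hv]

-- the character with lowercase index i (0 ≤ i < 26 in use)
def chI (i : Int) : Char := Char.ofNat (97 + i).toNat

def Lower (c : Char) : Prop := 97 ≤ c.toNat ∧ c.toNat < 123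

theorem lower_chI (i : Int) (h0 : 0 ≤ i) (h1 : i < 26) :
    Lower (chI i) ∧ ((chI i).toNat : Int) - 97 = i := by
  have hn : (97 + i).toNat < 55296 := by omega
  have ht : (Char.ofNat (97 + i).toNat).toNat = (97 + i).toNat := pvToNat_ofNat _ hn
  constructor
  · constructor <;> simp [chI, ht] <;> omega
  · simp [chI, ht]; omega

theorem chI_idx (c : Char) (_hc : Lower c) : chI ((c.toNat : Int) - 97) = c := by
  have h : ((97 : Int) + ((c.toNat : Int) - 97)).toNat = c.toNat := by omega
  simp only [chI, h, Char.ofNat_toNat]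

theorem lower_altStep (skip : List Char) (c : Char) : Lower (altStep skip c) := by
  unfold altStep Lower
  have h1 := PySem.Int.mod_nonneg ((c.toNat : Int) - 97 + 1) (b := 26) (by norm_num)
  have h2 := PySem.Int.mod_lt ((c.toNat : Int) - 97 + 1) (b := 26) (by norm_num)
  have h1' := PySem.Int.mod_nonneg ((c.toNat : Int) - 97 + 2) (b := 26) (by norm_num)
  have h2' := PySem.Int.mod_lt ((c.toNat : Int) - 97 + 2) (b := 26) (by norm_num)
  simp only
  split
  · rw [pvToNat_ofNat _ (by omega)]; omega
  · rw [pvToNat_ofNat _ (by omega)]; omega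

theorem lower_iter (f : Char → Char) (hf : ∀ c, Lower (f c)) (m : Nat) (c : Char)
    (hc : Lower c) : Lower (f^[m] c) := by
  induction m generalizing c with
  | zero => simpa using hc
  | succ k ih => rw [Function.iterate_succ_apply]; exact ih (f c) (hf c)

-- the canonical table representing f^[m] on the 26 lowercase letters
def tbl (f : Char → Char) (m : Nat) : List Int :=
  (PySem.List.pyRange 0 26 1).map (fun i => ((f^[m] (chI i)).toNat : Int) - 97)

theorem tbl_lookup (f : Char → Char) (_hf : ∀ c, Lower (f c)) (m : Nat) (d : Char)
    (hd : Lower d) :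
    PySem.List.pyGetD (tbl f m) ((d.toNat : Int) - 97) 0 = ((f^[m] d).toNat : Int) - 97 := by
  obtain ⟨hd1, hd2⟩ := hd
  unfold tbl
  rw [PySem.List.pyGetD_map_pyRange_of_nonneg _ 26 _ 0 (by omega) (by omega)]
  rw [chI_idx d ⟨hd1, hd2⟩]

theorem tbl_comp (f : Char → Char) (hf : ∀ c, Lower (f c)) (k e : Nat) :
    (tbl f e).map (fun a => PySem.List.pyGetD (tbl f k) a 0) = tbl f (k + e) := by
  unfold tbl
  rw [List.map_map]
  refine List.map_congr_left (fun i hi => ?_)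
  have hmem := (PySem.List.mem_pyRange_one).1 hi
  have hlow : Lower (f^[e] (chI i)) :=
    lower_iter f hf e _ (lower_chI i hmem.1 hmem.2).1
  show PySem.List.pyGetD (tbl f k) (((f^[e] (chI i)).toNat : Int) - 97) 0 = _
  rw [tbl_lookup f hf k _ hlow, Function.iterate_add_apply]

theorem altLoop_tbl (f : Char → Char) (hf : ∀ c, Lower (f c)) :
    ∀ m k e, altLoop (tbl f k) (tbl f e) m = tbl f (e + k * m) := by
  intro m
  induction m using Nat.strong_induction_on with
  | _ m ih =>
    intro k e
    rw [altLoop]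
    by_cases h : m = 0
    · simp [h]
    · rw [dif_neg h]
      have hcur : (tbl f k).map (fun x => PySem.List.pyGetD (tbl f k) x 0) = tbl f (k + k) :=
        tbl_comp f hf k k
      have hacc : (if m % 2 = 1 then (tbl f e).map (fun a => PySem.List.pyGetD (tbl f k) a 0)
          else tbl f e) = tbl f (e + k * (m % 2)) := by
        by_cases hp : m % 2 = 1
        · rw [if_pos hp, tbl_comp f hf k e, hp]; ring_nf
        · rw [if_neg hp]
          have : m % 2 = 0 := by omega
          rw [this]; ring_nf
      rw [hcur, hacc, ih (m / 2) (Nat.div_lt_self (Nat.pos_of_ne_zero h) one_lt_two)]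
      congr 1
      have hm : m = 2 * (m / 2) + m % 2 := (Nat.div_add_mod m 2).symm ▸ by omega
      nlinarith [Nat.div_add_mod m 2]

theorem foldl_const_iterate (f : Char → Char) (l : List Int) (c : Char) :
    l.foldl (fun c _ => f c) c = f^[l.length] c := by
  induction l generalizing c with
  | nil => rfl
  | cons x xs ih => simp [List.foldl_cons, ih, Function.iterate_succ_apply]

-- A's loop body equals Source B's step
theorem body_eq_altStep (skip : List Char) (c : Char) :
    (if PySem.Chars.isIn [c] skip then
        Char.ofNat (PySem.Int.mod ((c.toNat : Int) - 97 + 1) 26 + 97).toNat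
      else
        if PySem.Chars.isIn [Char.ofNat (PySem.Int.mod ((c.toNat : Int) - 97 + 1) 26 + 97).toNat] skip then
          Char.ofNat (PySem.Int.mod ((c.toNat : Int) - 97 + 2) 26 + 97).toNat
        else
          Char.ofNat (PySem.Int.mod ((c.toNat : Int) - 97 + 1) 26 + 97).toNat)
      = altStep skip c := by
  unfold altStep
  by_cases h1 : PySem.Chars.isIn [c] skip
  · simp [h1]
  · by_cases h2 : PySem.Chars.isIn [Char.ofNat (PySem.Int.mod ((c.toNat : Int) - 97 + 1) 26 + 97).toNat] skip
    · simp [h1]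
    · simp [h1]

theorem base_eq_tbl (skip : List Char) :
    (PySem.List.pyRange 0 26 1).map (fun i =>
      ((altStep skip (Char.ofNat (97 + i).toNat)).toNat : Int) - 97) = tbl (altStep skip) 1 := by
  unfold tbl chI
  simp

theorem acc0_eq_tbl (skip : List Char) :
    (PySem.List.pyRange 0 26 1).map (fun i => i) = tbl (altStep skip) 0 := by
  unfold tbl
  refine List.map_congr_left (fun i hi => ?_)
  have hmem := (PySem.List.mem_pyRange_one).1 hi
  have := (lower_chI i hmem.1 hmem.2).2
  simpa using this.symm

-- ===== VERDICT (by name: the statement is the Claim_ definition above) =====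
theorem solution_spec : Claim_equal_solution := by
  intro s skip index _hdom
  unfold Spec_solution solution solution_alt
  by_cases hle : index ≤ 0
  · rw [if_pos hle, PySem.List.pyRange_one_eq_nil (by omega)]
    simp
  · rw [if_neg hle]
    have hf : ∀ c, Lower (altStep skip.toList c) := lower_altStep skip.toList
    set f := altStep skip.toList with hfdef
    congr 1
    refine List.map_congr_left (fun c0 _ => ?_)
    -- A side: the foldl is f iterated index.toNat times
    have hbody : (fun (c : Char) (_j : Int) =>
        if PySem.Chars.isIn [c] skip.toList then
          Char.ofNat (PySem.Int.mod ((c.toNat : Int) - 97 + 1) 26 + 97).toNat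
        else
          if PySem.Chars.isIn [Char.ofNat (PySem.Int.mod ((c.toNat : Int) - 97 + 1) 26 + 97).toNat] skip.toList then
            Char.ofNat (PySem.Int.mod ((c.toNat : Int) - 97 + 2) 26 + 97).toNat
          else
            Char.ofNat (PySem.Int.mod ((c.toNat : Int) - 97 + 1) 26 + 97).toNat)
        = fun c _j => f c := by
      funext c _j
      exact body_eq_altStep skip.toList c
    rw [hbody, foldl_const_iterate, PySem.List.length_pyRange_one]
    -- B side
    rw [base_eq_tbl, acc0_eq_tbl, altLoop_tbl f hf ((index - 1).toNat) 1 0]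
    have hnorm : 0 + 1 * (index - 1).toNat = (index - 1).toNat := by omega
    rw [hnorm]
    have hlowfc : Lower (f c0) := hf c0
    rw [tbl_lookup f hf _ (f c0) hlowfc]
    have hlow : Lower (f^[(index - 1).toNat] (f c0)) :=
      lower_iter f hf _ _ hlowfc
    have harith : ((97 : Int) + (((f^[(index - 1).toNat] (f c0)).toNat : Int) - 97)).toNat
        = (f^[(index - 1).toNat] (f c0)).toNat := by omega
    rw [harith, Char.ofNat_toNat]
    have hidx : (index - 0).toNat = (index - 1).toNat + 1 := by omega
    rw [hidx, Function.iterate_succ_apply]
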